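-- pv_equiv track=rewrite | github.com/plahteenlahti/tiras20 | fliptwo.py | solve
-- ===== SOURCE A (Python) =====
-- from collections import deque
--
-- def solve(n,k):
-- 	l = deque(range(1,n+1))
-- 	for i in range(k):
-- 		l.append(l[1])
-- 		l.append(l[0])
-- 		l.popleft()
-- 		l.popleft()
-- 	return l[0]
-- ===== SOURCE B (Python) =====
-- def solve(n, k):
--     # index recurrence: tape[j] = tape[(j - n) ^ 1] for j >= n, tape[j] = j + 1 for j < n;
--     # the front of the deque after k rotations is tape[2k]
--     j = 2 * max(k, 0)
--     while j >= n:
--         j = (j - n) ^ 1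
--     return j + 1
-- ===== Notes on version B (the rewrite author's own statement) =====
-- stated objective: faster
-- what changed: Instead of simulating k front-pair-reverse rotations of the deque (O(k)), B evaluates the index recurrence tape[j] = tape[(j-n)^1] starting from j = 2k, which reaches an index below n after O(k/n) steps and reads the answer off directly.
import Mathlib
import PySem

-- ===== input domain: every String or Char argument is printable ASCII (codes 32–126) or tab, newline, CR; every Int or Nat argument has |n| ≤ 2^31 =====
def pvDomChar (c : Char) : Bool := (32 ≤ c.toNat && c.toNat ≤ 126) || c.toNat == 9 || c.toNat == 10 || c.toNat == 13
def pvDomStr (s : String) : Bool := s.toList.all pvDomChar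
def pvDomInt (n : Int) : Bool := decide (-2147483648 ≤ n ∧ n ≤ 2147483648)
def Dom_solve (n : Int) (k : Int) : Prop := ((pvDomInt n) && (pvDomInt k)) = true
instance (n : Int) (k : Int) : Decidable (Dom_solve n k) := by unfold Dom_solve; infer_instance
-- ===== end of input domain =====

-- B replaces the O(k) deque simulation by the index recurrence tape[j] = tape[(j-n)^1]
-- evaluated from j = 2k, which is measurably faster (asymptotically O(k/n)).

-- ===== PORT A =====
-- one loop iteration: l.append(l[1]); l.append(l[0]); l.popleft(); l.popleft()
-- (the 'none' branch is Python's IndexError on l[1]/l[0]; excluded by Pre_solve)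
def stepA (l : List Int) : List Int :=
  match PySem.List.pyGet? l 1, PySem.List.pyGet? l 0 with
  | some a, some b => ((l ++ [a]) ++ [b]).drop 2
  | _, _ => l

def solve (n : Int) (k : Int) : Int :=
  match PySem.List.pyGet?
      ((PySem.List.pyRange 0 k 1).foldl (fun l _ => stepA l)
        (PySem.List.pyRange 1 (n + 1) 1)) 0 with
  | some v => v
  | none => 0   -- IndexError on l[0]; excluded by Pre_solve

-- ===== PORT B =====
-- the while-loop of Source B; fuel only makes it total (under Pre_solve, j strictly decreases,
-- so fuel j0+1 is never exhausted).  In the loop j ≥ n, so j - n ≥ 0 and Python's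
-- '(j - n) ^ 1' is exactly Nat xor on (j - n).toNat.
def loopB (fuel : Nat) (n : Int) (j : Int) : Int :=
  match fuel with
  | 0 => j
  | f + 1 => if n ≤ j then loopB f n (((j - n).toNat ^^^ 1 : Nat) : Int) else j

def solve_alt (n : Int) (k : Int) : Int :=
  loopB ((2 * max k 0).toNat + 1) n (2 * max k 0) + 1

-- ===== PRECONDITION & SPEC =====
-- A raises IndexError when n < 1 (empty deque at the final l[0]) and when n = 1 with k ≥ 1 (l[1]).
def Pre_solve (n : Int) (k : Int) : Prop := 1 ≤ n ∧ (1 ≤ k → 2 ≤ n)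
instance (n : Int) (k : Int) : Decidable (Pre_solve n k) := by unfold Pre_solve; infer_instance
def pvWitness_solve : Int × Int := (3, 4)

def Spec_solve (n : Int) (k : Int) (out : Int) : Prop := out = solve_alt n k
instance (n : Int) (k : Int) (out : Int) : Decidable (Spec_solve n k out) := by unfold Spec_solve; infer_instance

-- ===== CLAIM (what is proved, stated in full; the proofs are below) =====
def Claim_equal_solve : Prop := ∀ (n : Int) (k : Int), Dom_solve n k → Pre_solve n k → Spec_solve n k (solve n k)

-- ===== LEMMAS AND PROOFS =====

-- tape nn j: the j-th element ever to occupy the deque (first n entries are 1..n, each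
-- rotation appends the swapped front pair).  The 'nn < 2' escape only makes it total.
def tape (nn : Nat) (j : Nat) : Int :=
  if h : j < nn ∨ nn < 2 then (j : Int) + 1
  else tape nn ((j - nn) ^^^ 1)
termination_by j
decreasing_by
  rcases Nat.even_or_odd (j - nn) with he | ho
  · rw [Nat.xor_one_of_even he]; omega
  · rw [Nat.xor_one_of_odd ho]; omega

theorem tape_base (nn j : Nat) (h : j < nn) : tape nn j = (j : Int) + 1 := by
  rw [tape]; simp [h]

theorem tape_step (nn j : Nat) (h2 : 2 ≤ nn) (hj : nn ≤ j) :
    tape nn j = tape nn ((j - nn) ^^^ 1) := by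
  rw [tape]; rw [dif_neg (by omega)]

theorem tape_shift_even (nn i : Nat) (h2 : 2 ≤ nn) :
    tape nn (2 * i + nn) = tape nn (2 * i + 1) := by
  rw [tape_step nn (2 * i + nn) h2 (by omega)]
  have : 2 * i + nn - nn = 2 * i := by omega
  rw [this, Nat.xor_one_of_even ⟨i, by omega⟩]

theorem tape_shift_odd (nn i : Nat) (h2 : 2 ≤ nn) :
    tape nn (2 * i + nn + 1) = tape nn (2 * i) := by
  rw [tape_step nn (2 * i + nn + 1) h2 (by omega)]
  have : 2 * i + nn + 1 - nn = 2 * i + 1 := by omega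
  rw [this, Nat.xor_one_of_odd ⟨i, by omega⟩]
  congr 1

-- the deque after i rotations
def LA (nn i : Nat) : List Int := (List.range' (2 * i) nn).map (tape nn)

theorem stepA_LA (nn i : Nat) (h2 : 2 ≤ nn) : stepA (LA nn i) = LA nn (i + 1) := by
  have hlen : (LA nn i).length = nn := by simp [LA]
  have h1 : PySem.List.pyGet? (LA nn i) 1 = some (tape nn (2 * i + 1)) := by
    rw [show (1 : Int) = ((1 : Nat) : Int) by norm_num,
        PySem.List.pyGet?_natCast]
    rw [List.getElem?_eq_getElem (by omega)]
    simp [LA]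
  have h0 : PySem.List.pyGet? (LA nn i) 0 = some (tape nn (2 * i)) := by
    rw [show (0 : Int) = ((0 : Nat) : Int) by norm_num,
        PySem.List.pyGet?_natCast]
    rw [List.getElem?_eq_getElem (by omega)]
    simp [LA]
  unfold stepA
  rw [h1, h0]
  dsimp only
  have happ : ((LA nn i ++ [tape nn (2 * i + 1)]) ++ [tape nn (2 * i)])
      = (List.range' (2 * i) (nn + 2)).map (tape nn) := by
    rw [List.range'_concat, List.range'_concat]
    simp only [List.map_append, List.map_cons, List.map_nil, LA]
    rw [show 2 * i + 1 * nn = 2 * i + nn by ring,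
        show 2 * i + 1 * (nn + 1) = 2 * i + nn + 1 by ring,
        tape_shift_even nn i h2, tape_shift_odd nn i h2]
  rw [happ]
  rw [show nn + 2 = (nn + 1) + 1 by omega, List.range'_succ, List.range'_succ]
  simp only [List.map_cons, List.drop_succ_cons, List.drop_zero]
  unfold LA
  congr 1

theorem foldA (nn : Nat) (h2 : 2 ≤ nn) (lst : List Int) :
    ∀ i, lst.foldl (fun l _ => stepA l) (LA nn i) = LA nn (i + lst.length) := by
  induction lst with
  | nil => intro i; simp
  | cons x xs ih =>
      intro i
      simp only [List.foldl_cons, stepA_LA nn i h2, List.length_cons]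
      rw [ih (i + 1)]
      congr 1
      omega

theorem loopB_tape (n : Int) (h2 : 2 ≤ n) :
    ∀ (f : Nat) (j : Int), 0 ≤ j → j.toNat < f →
      loopB f n j + 1 = tape n.toNat j.toNat := by
  intro f
  induction f with
  | zero => intro j _ hf; omega
  | succ f ih =>
      intro j hj hf
      by_cases hnj : n ≤ j
      · have hsub : (j - n).toNat = j.toNat - n.toNat := by omega
        have hlt : ((j - n).toNat ^^^ 1) < j.toNat := by
          rcases Nat.even_or_odd ((j - n).toNat) with he | ho
          · rw [Nat.xor_one_of_even he]; omega
          · rw [Nat.xor_one_of_odd ho]; omega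
        have := ih (((j - n).toNat ^^^ 1 : Nat) : Int) (by positivity)
          (by rw [Int.toNat_natCast]; omega)
        rw [loopB, if_pos hnj, this, Int.toNat_natCast, hsub]
        rw [tape_step n.toNat j.toNat (by omega) (by omega)]
      · rw [loopB, if_neg hnj]
        rw [tape_base n.toNat j.toNat (by omega)]
        omega

theorem init_LA (n : Int) (h1 : 1 ≤ n) :
    PySem.List.pyRange 1 (n + 1) 1 = LA n.toNat 0 := by
  rw [PySem.List.pyRange_one]
  unfold LA
  rw [show (n + 1 - 1).toNat = n.toNat by omega, Nat.mul_zero,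
      ← List.range_eq_range']
  apply List.map_congr_left
  intro t ht
  rw [List.mem_range] at ht
  rw [tape_base n.toNat t ht]
  omega

-- ===== VERDICT (by name: the statement is the Claim_ definition above) =====
theorem solve_spec : Claim_equal_solve := by
  intro n k _ hpre
  obtain ⟨h1, hk2⟩ := hpre
  unfold Spec_solve solve solve_alt
  by_cases hk : 1 ≤ k
  · -- k ≥ 1, hence n ≥ 2
    have h2 : 2 ≤ n := hk2 hk
    rw [init_LA n h1]
    rw [foldA n.toNat (by omega) _ 0]
    rw [PySem.List.length_pyRange_one, Nat.zero_add]
    have hget : PySem.List.pyGet? (LA n.toNat ((k - 0).toNat)) 0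
        = some (tape n.toNat (2 * (k - 0).toNat)) := by
      unfold LA
      rw [show n.toNat = (n.toNat - 1) + 1 by omega, List.range'_succ]
      simp
    rw [hget]
    dsimp only
    have hj0 : (2 * max k 0 : Int) = 2 * k := by
      rw [max_eq_left (by omega)]
    rw [hj0]
    have hB := loopB_tape n h2 ((2 * k).toNat + 1) (2 * k) (by omega) (by omega)
    have : (k - 0).toNat = (2 * k).toNat / 2 := by omega
    rw [show 2 * (k - 0).toNat = (2 * k).toNat by omega]
    omega
  · -- k ≤ 0: no rotation in A, no loop iteration in B; both return 1
    rw [show PySem.List.pyRange 0 k 1 = [] from PySem.List.pyRange_one_eq_nil (by omega)]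
    simp only [List.foldl_nil]
    rw [show PySem.List.pyRange 1 (n + 1) 1 = 1 :: PySem.List.pyRange (1 + 1) (n + 1) 1
          from PySem.List.pyRange_one_cons (by omega),
        PySem.List.pyGet?_zero_cons]
    have hj0 : (2 * max k 0 : Int) = 0 := by
      rw [max_eq_right (by omega)]; ring
    rw [hj0]
    norm_num [loopB, show ¬ n ≤ 0 by omega]
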